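-- pv_equiv track=rewrite | github.com/paulodder/QuantifierComplexity | src/utils.py | quantity_signature
-- ===== SOURCE A (Python) =====
-- def quantity_signature(m):
--     out = [0, 0, 0, 0]
--     for a, b in zip(*m):
--         if a and b:
--             out[0] += 1
--         elif a:
--             out[1] += 1
--         elif b:
--             out[2] += 1
--     return tuple(out)
--
--     idxs = []
--     for i, (a, b) in enumerate(zip(*m)):
--         if a and not b:
--             idxs.append(0)
--         if a == b == True:
--             idxs.append(1)
--         # elif a and not b:
--         #     idxs.append(-i)
--     return tuple([x - min(idxs) for x in idxs])
-- ===== SOURCE B (Python) =====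
-- def quantity_signature(m):
--     pairs = list(zip(*m))
--     both = sum(1 for a, b in pairs if a and b)
--     ta = sum(1 for a, _ in pairs if a)
--     tb = sum(1 for _, b in pairs if b)
--     return (both, ta - both, tb - both, 0)
-- ===== Notes on version B (the rewrite author's own statement) =====
-- stated objective: alternative
-- what changed: Instead of classifying each pair into one of four branches, B counts three overlapping totals (both truthy, first truthy, second truthy) and derives the exclusive first-only/second-only counts by inclusion-exclusion subtraction.
import Mathlib
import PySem

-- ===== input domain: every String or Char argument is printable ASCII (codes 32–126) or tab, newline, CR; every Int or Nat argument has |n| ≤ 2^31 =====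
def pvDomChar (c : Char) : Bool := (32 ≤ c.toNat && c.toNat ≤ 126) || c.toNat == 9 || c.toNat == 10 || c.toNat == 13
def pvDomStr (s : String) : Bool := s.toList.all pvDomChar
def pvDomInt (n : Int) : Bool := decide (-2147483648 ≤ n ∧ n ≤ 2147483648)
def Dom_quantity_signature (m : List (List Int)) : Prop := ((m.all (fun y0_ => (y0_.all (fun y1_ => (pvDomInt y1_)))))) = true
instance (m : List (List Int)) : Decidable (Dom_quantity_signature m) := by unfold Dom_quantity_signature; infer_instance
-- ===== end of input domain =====

-- B replaces A's per-pair four-way classification by three overlapping truthy counts plus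
-- inclusion-exclusion subtraction; same O(n) cost, a different decomposition.

-- ===== PORT A =====
-- zip(*m) unpacked into (a, b): under Pre_ either m = [a, b] (zip = a.zip b) or the zip is
-- empty (m = [] or some row empty); any other m raises ValueError in Python (excluded by Pre_).
def pvPairs (m : List (List Int)) : List (Int × Int) :=
  match m with
  | [a, b] => a.zip b
  | _ => []

def quantity_signature (m : List (List Int)) : Int × Int × Int × Int :=
  let out : Int × Int × Int × Int :=
    (pvPairs m).foldl (fun (o : Int × Int × Int × Int) p =>
      if p.1 ≠ 0 ∧ p.2 ≠ 0 then (o.1 + 1, o.2.1, o.2.2.1, o.2.2.2)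
      else if p.1 ≠ 0 then (o.1, o.2.1 + 1, o.2.2.1, o.2.2.2)
      else if p.2 ≠ 0 then (o.1, o.2.1, o.2.2.1 + 1, o.2.2.2)
      else o) (0, 0, 0, 0)
  out

-- ===== PORT B =====
def quantity_signature_alt (m : List (List Int)) : Int × Int × Int × Int :=
  let pairs := pvPairs m
  let both : Int := (pairs.countP (fun p => p.1 != 0 && p.2 != 0) : Nat)
  let ta : Int := (pairs.countP (fun p => p.1 != 0) : Nat)
  let tb : Int := (pairs.countP (fun p => p.2 != 0) : Nat)
  (both, ta - both, tb - both, 0)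

-- ===== PRECONDITION & SPEC =====
-- Pre_ excludes exactly the inputs where Python A raises ValueError while unpacking zip(*m):
-- m with length ≠ 2 and no empty row (and m ≠ []).
def Pre_quantity_signature (m : List (List Int)) : Prop :=
  m.length = 2 ∨ m = [] ∨ m.any (fun r => r.isEmpty) = true
instance (m : List (List Int)) : Decidable (Pre_quantity_signature m) := by
  unfold Pre_quantity_signature; infer_instance

def pvWitness_quantity_signature : List (List Int) := [[1, 0, 2, 0], [3, 4, 0, 0]]

def Spec_quantity_signature (m : List (List Int)) (out : Int × Int × Int × Int) : Prop := out = quantity_signature_alt m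
instance (m : List (List Int)) (out : Int × Int × Int × Int) : Decidable (Spec_quantity_signature m out) := by unfold Spec_quantity_signature; infer_instance

-- ===== CLAIM (what is proved, stated in full; the proofs are below) =====
def Claim_equal_quantity_signature : Prop := ∀ (m : List (List Int)), Dom_quantity_signature m → Pre_quantity_signature m → Spec_quantity_signature m (quantity_signature m)

-- ===== LEMMAS AND PROOFS =====
theorem pv_loop (l : List (Int × Int)) (o : Int × Int × Int × Int) :
    l.foldl (fun (o : Int × Int × Int × Int) p =>
      if p.1 ≠ 0 ∧ p.2 ≠ 0 then (o.1 + 1, o.2.1, o.2.2.1, o.2.2.2)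
      else if p.1 ≠ 0 then (o.1, o.2.1 + 1, o.2.2.1, o.2.2.2)
      else if p.2 ≠ 0 then (o.1, o.2.1, o.2.2.1 + 1, o.2.2.2)
      else o) o
    = (o.1 + (l.countP (fun p => p.1 != 0 && p.2 != 0) : Int),
       o.2.1 + ((l.countP (fun p => p.1 != 0) : Int) - (l.countP (fun p => p.1 != 0 && p.2 != 0) : Int)),
       o.2.2.1 + ((l.countP (fun p => p.2 != 0) : Int) - (l.countP (fun p => p.1 != 0 && p.2 != 0) : Int)),
       o.2.2.2) := by
  induction l generalizing o with
  | nil => simp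
  | cons p t ih =>
    simp only [List.foldl_cons, List.countP_cons, ih]
    by_cases h1 : p.1 = 0 <;> by_cases h2 : p.2 = 0 <;>
      simp [h1, h2] <;> ring

-- ===== VERDICT (by name: the statement is the Claim_ definition above) =====
theorem quantity_signature_spec : Claim_equal_quantity_signature := by
  intro m _ _
  show _ = _
  simp only [quantity_signature, quantity_signature_alt, pv_loop]
  simp
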